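-- pv_equiv track=rewrite | github.com/AndrewSigorskih/ROSALIND_problems | Bioinformatics Stronghold/62_rear_park.py | findMinimumBreakpointReversals
-- ===== SOURCE A (Python) =====
-- def get_reverse(seq: list, i: int, j: int) -> list:
--     return seq[:i] + seq[i:j][::-1] + seq[j:]
--
-- def findBreakpoints(seq:list, targ: list) -> list:
--     return [
--         i + 1 for i in range(len(seq) - 1) \
--             if (abs(targ.index(seq[i]) - targ.index(seq[i + 1])) != 1)
--     ]
--
-- def findMinimumBreakpointReversals(seqs: list, targ: list) -> list:
--     reversals = []
--     for seq in seqs: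
--         breakpoints = findBreakpoints(seq[0], targ)
--         for i in range(len(breakpoints)-1):
--             for j in range(i+1, len(breakpoints)):
--                 reversals.append((get_reverse(seq[0], breakpoints[i], breakpoints[j]), \
--                                   seq[1] + [(breakpoints[i]-1, breakpoints[j]-1)])
--                                 )
--     min_bp = len(targ)
--     min_reversals = []
--     for reversal in reversals:
--         num_breakpoints = len(findBreakpoints(reversal[0], targ))
--         if num_breakpoints < min_bp:
--             min_bp = num_breakpoints
--             min_reversals = [reversal]
--         elif num_breakpoints == min_bp:
--             min_reversals.append(reversal)
--     return min_reversals
-- ===== SOURCE B (Python) =====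
-- def get_reverse(seq, i, j):
--     return seq[:i] + seq[i:j][::-1] + seq[j:]
--
--
-- def findMinimumBreakpointReversals(seqs, targ):
--     # One position table built once replaces every targ.index scan, and each
--     # candidate is scored in O(1): reversing between two breakpoints only
--     # changes the adjacencies at its two boundaries (|difference| is preserved
--     # inside and outside the reversed block), so
--     #   new count = old count - 2 + (boundary still broken) + (boundary still broken).
--     pos = {}
--     for k, v in enumerate(targ):
--         pos.setdefault(v, k)
--     scored = []
--     for seq, ops in seqs:
--         if len(seq) < 2:
--             continue
--         p = [pos[v] for v in seq]
--         bps = [k + 1 for k in range(len(p) - 1) if abs(p[k] - p[k + 1]) != 1]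
--         base = len(bps)
--         for x in range(len(bps) - 1):
--             bi = bps[x]
--             for y in range(x + 1, len(bps)):
--                 bj = bps[y]
--                 cnt = base - 2 + (abs(p[bi - 1] - p[bj - 1]) != 1) + (abs(p[bi] - p[bj]) != 1)
--                 scored.append(((get_reverse(seq, bi, bj), ops + [(bi - 1, bj - 1)]), cnt))
--     best = min([len(targ)] + [c for _, c in scored])
--     return [r for r, c in scored if c == best]
-- ===== Notes on version B (the rewrite author's own statement) =====
-- stated objective: alternative
-- what changed: B builds a value-to-position table once instead of repeated targ.index scans, and scores every candidate reversal in O(1) from the parent's breakpoint count (a reversal between two breakpoints only changes the two boundary adjacencies) instead of recounting breakpoints of each reversed sequence, then selects by one min over the collected scores.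
import Mathlib
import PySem

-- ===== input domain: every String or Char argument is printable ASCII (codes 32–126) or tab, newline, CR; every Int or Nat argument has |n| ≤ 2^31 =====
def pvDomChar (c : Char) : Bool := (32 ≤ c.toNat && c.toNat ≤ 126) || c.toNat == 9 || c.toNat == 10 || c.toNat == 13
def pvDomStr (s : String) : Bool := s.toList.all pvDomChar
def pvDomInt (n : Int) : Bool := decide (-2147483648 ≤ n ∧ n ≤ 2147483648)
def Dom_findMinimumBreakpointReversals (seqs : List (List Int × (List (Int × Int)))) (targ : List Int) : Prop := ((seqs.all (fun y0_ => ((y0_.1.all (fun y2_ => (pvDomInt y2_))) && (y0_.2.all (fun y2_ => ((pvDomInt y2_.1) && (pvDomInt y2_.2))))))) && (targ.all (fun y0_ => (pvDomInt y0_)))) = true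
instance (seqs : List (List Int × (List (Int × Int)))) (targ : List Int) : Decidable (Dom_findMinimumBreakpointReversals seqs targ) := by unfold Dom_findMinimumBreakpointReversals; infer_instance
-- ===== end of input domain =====

-- B builds a value→position table once (no repeated targ.index scans) and scores each
-- candidate reversal directly from the parent's breakpoint count (only the two boundary
-- adjacencies change) instead of recounting the reversed sequence; objective: alternative.

-- ===== PORT A =====
-- targ.index(x); under Pre_ every looked-up element is in targ, so index? is some (getD 0 never fires inside Pre_)
def fbIdx (targ : List Int) (x : Int) : Int := (((PySem.List.index? targ x).getD 0 : Nat) : Int)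

-- xs[i] with i always in range at call sites (the default 0 never fires)
def bget (xs : List Int) (i : Int) : Int := PySem.List.pyGetD xs i 0

-- seq[:i] + seq[i:j][::-1] + seq[j:]; xs[::-1] is reverse (PySem.List.slice?_none_none_neg_one)
def getReverse (seq : List Int) (i j : Int) : List Int :=
  PySem.List.slice seq none (some i) ++ (PySem.List.slice seq (some i) (some j)).reverse ++ PySem.List.slice seq (some j) none

-- [i+1 for i in range(len(seq)-1) if abs(targ.index(seq[i]) - targ.index(seq[i+1])) != 1]
def findBreakpointsL (seq targ : List Int) : List Int :=
  (PySem.List.pyRange 0 ((seq.length : Int) - 1) 1).filterMap (fun i =>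
    if (fbIdx targ (bget seq i) - fbIdx targ (bget seq (i + 1))).natAbs ≠ 1 then some (i + 1) else none)

def findMinimumBreakpointReversals (seqs : List (List Int × (List (Int × Int)))) (targ : List Int) : List (List Int × (List (Int × Int))) :=
  let reversals := seqs.foldl (fun revs sq =>
    let bps := findBreakpointsL sq.1 targ
    (PySem.List.pyRange 0 ((bps.length : Int) - 1) 1).foldl (fun acc i =>
      (PySem.List.pyRange (i + 1) (bps.length : Int) 1).foldl (fun acc2 j =>
        acc2 ++ [(getReverse sq.1 (bget bps i) (bget bps j),
                  sq.2 ++ [(bget bps i - 1, bget bps j - 1)])]) acc) revs) []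
  let fin := reversals.foldl (fun st r =>
    let n : Int := ((findBreakpointsL r.1 targ).length : Int)
    if n < st.1 then (n, [r])
    else if n = st.1 then (st.1, st.2 ++ [r])
    else st) (((targ.length : Int)), ([] : List (List Int × (List (Int × Int)))))
  fin.2

-- ===== PORT B =====
-- pos = {}; for k, v in enumerate(targ): pos.setdefault(v, k)
def posTable (targ : List Int) : PySem.Dict Int Int :=
  (PySem.List.enumerate targ 0).foldl (fun d kv => d.setdefault kv.2 kv.1) PySem.Dict.empty

-- [k + 1 for k in range(len(p) - 1) if abs(p[k] - p[k+1]) != 1]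
def bpsAlt (p : List Int) : List Int :=
  (PySem.List.pyRange 0 ((p.length : Int) - 1) 1).filterMap (fun k =>
    if (bget p k - bget p (k + 1)).natAbs ≠ 1 then some (k + 1) else none)

def findMinimumBreakpointReversals_alt (seqs : List (List Int × (List (Int × Int)))) (targ : List Int) : List (List Int × (List (Int × Int))) :=
  let pos := posTable targ
  let scored := seqs.foldl (fun acc sq =>
    if sq.1.length < 2 then acc else
    -- pos[v]; a KeyError (element absent from targ) is excluded by Pre_
    let p := sq.1.map (fun v => (PySem.Dict.get? pos v).getD 0)
    let bps := bpsAlt p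
    let base : Int := (bps.length : Int)
    (PySem.List.pyRange 0 ((bps.length : Int) - 1) 1).foldl (fun a x =>
      let bi := bget bps x
      (PySem.List.pyRange (x + 1) (bps.length : Int) 1).foldl (fun a2 y =>
        let bj := bget bps y
        -- bool-in-arithmetic: base - 2 + (abs(..) != 1) + (abs(..) != 1)
        let cnt : Int := base - 2 + (if (bget p (bi - 1) - bget p (bj - 1)).natAbs ≠ 1 then 1 else 0)
                                  + (if (bget p bi - bget p bj).natAbs ≠ 1 then 1 else 0)
        a2 ++ [((getReverse sq.1 bi bj, sq.2 ++ [(bi - 1, bj - 1)]), cnt)]) a) acc) []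
  let best := (PySem.List.min? (((targ.length : Int)) :: scored.map (fun rc => rc.2)) (fun y => y)).getD 0
  scored.filterMap (fun rc => if rc.2 = best then some rc.1 else none)

-- ===== PRECONDITION & SPEC =====
-- Pre_ excludes exactly the inputs where Python raises: a sequence of length ≥ 2 containing an
-- element absent from targ (targ.index raises ValueError in A; pos[v] raises KeyError in B).
def Pre_findMinimumBreakpointReversals (seqs : List (List Int × (List (Int × Int)))) (targ : List Int) : Prop :=
  ∀ p ∈ seqs, p.1.length ≤ 1 ∨ ∀ x ∈ p.1, x ∈ targ
instance (seqs : List (List Int × (List (Int × Int)))) (targ : List Int) : Decidable (Pre_findMinimumBreakpointReversals seqs targ) := by unfold Pre_findMinimumBreakpointReversals; infer_instance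

def pvWitness_findMinimumBreakpointReversals : (List (List Int × (List (Int × Int)))) × List Int :=
  ([([1, 3, 2, 4], []), ([2, 1], [(0, 1)])], [1, 2, 3, 4])

def Spec_findMinimumBreakpointReversals (seqs : List (List Int × (List (Int × Int)))) (targ : List Int) (out : List (List Int × (List (Int × Int)))) : Prop := out = findMinimumBreakpointReversals_alt seqs targ
instance (seqs : List (List Int × (List (Int × Int)))) (targ : List Int) (out : List (List Int × (List (Int × Int)))) : Decidable (Spec_findMinimumBreakpointReversals seqs targ out) := by unfold Spec_findMinimumBreakpointReversals; infer_instance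

-- ===== CLAIM (what is proved, stated in full; the proofs are below) =====
def Claim_equal_findMinimumBreakpointReversals : Prop := ∀ (seqs : List (List Int × (List (Int × Int)))) (targ : List Int), Dom_findMinimumBreakpointReversals seqs targ → Pre_findMinimumBreakpointReversals seqs targ → Spec_findMinimumBreakpointReversals seqs targ (findMinimumBreakpointReversals seqs targ)

-- ===== LEMMAS AND PROOFS =====

-- abs is symmetric in the difference
lemma natAbs_sub_comm (a b : Int) : (a - b).natAbs = (b - a).natAbs := by
  rw [← Int.natAbs_neg, neg_sub]

-- the setdefault loop keeps the FIRST index of each value, i.e. computes targ.index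
lemma pos_loop (v : Int) : ∀ (l : List Int) (s : Int) (d : PySem.Dict Int Int),
    ((PySem.List.enumerate l s).foldl (fun d kv => d.setdefault kv.2 kv.1) d).get? v
      = (d.get? v).or ((PySem.List.index? l v).map (fun k => s + (k : Int)))
  | [], s, d => by simp [PySem.List.enumerate]
  | x :: t, s, d => by
    rw [PySem.List.enumerate_cons, List.foldl_cons, pos_loop v t (s + 1) (d.setdefault x s)]
    by_cases hvx : v = x
    · subst hvx
      rw [PySem.Dict.get?_setdefault_self, PySem.List.index?_cons_self]
      cases d.get? v <;> simp
    · rw [PySem.Dict.get?_setdefault_of_ne _ _ hvx,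
        PySem.List.index?_cons_of_ne _ (fun h => hvx h.symm)]
      cases PySem.List.index? t v <;> cases d.get? v <;> simp <;> ring

-- B's dict lookup IS A's fbIdx, for every value (both default to 0 when v ∉ targ)
lemma posTable_get (targ : List Int) (v : Int) :
    ((PySem.Dict.get? (posTable targ) v).getD 0) = fbIdx targ v := by
  unfold posTable fbIdx
  rw [pos_loop v targ 0 PySem.Dict.empty]
  cases h : PySem.List.index? targ v <;> simp [PySem.Dict.get?_empty]

-- B's breakpoints of the position list are A's breakpoints of the sequence
lemma bpsAlt_eq (seq targ : List Int) :
    bpsAlt (seq.map (fun v => (PySem.Dict.get? (posTable targ) v).getD 0)) = findBreakpointsL seq targ := by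
  unfold bpsAlt findBreakpointsL
  rw [List.length_map]
  refine List.filterMap_congr (fun k hk => ?_)
  obtain ⟨hk0, hk1⟩ := PySem.List.mem_pyRange_one.mp hk
  have hlen : (1 : Int) ≤ seq.length := by omega
  have h1 : bget (seq.map (fun v => (PySem.Dict.get? (posTable targ) v).getD 0)) k
      = fbIdx targ (bget seq k) := by
    rw [bget, bget, PySem.List.pyGetD_eq_getElem _ _ hk0 (by simp; omega),
      PySem.List.pyGetD_eq_getElem _ _ hk0 (by omega), List.getElem_map, posTable_get]
  have h2 : bget (seq.map (fun v => (PySem.Dict.get? (posTable targ) v).getD 0)) (k + 1)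
      = fbIdx targ (bget seq (k + 1)) := by
    rw [bget, bget, PySem.List.pyGetD_eq_getElem _ _ (by omega) (by simp; omega),
      PySem.List.pyGetD_eq_getElem _ _ (by omega) (by omega), List.getElem_map, posTable_get]
  rw [h1, h2]

-- breakpoint counter over adjacent pairs
def badB (a b : Int) : Bool := decide ((a - b).natAbs ≠ 1)

def cAdj : List Int → Nat
  | a :: b :: t => (if badB a b then 1 else 0) + cAdj (b :: t)
  | _ => 0

lemma badB_comm (a b : Int) : badB a b = badB b a := by
  simp [badB, natAbs_sub_comm]

lemma cAdj_append : ∀ (a b : List Int) (ha : a ≠ []) (hb : b ≠ []),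
    cAdj (a ++ b) = cAdj a + (if badB (a.getLast ha) (b.head hb) then 1 else 0) + cAdj b
  | [], _, ha, _ => absurd rfl ha
  | [x], y :: t, _, _ => by simp [cAdj]
  | x1 :: x2 :: t, b, _, hb => by
    rw [List.cons_append]
    show (if badB x1 x2 then 1 else 0) + cAdj ((x2 :: t) ++ b) = _
    rw [List.getLast_cons (by simp : (x2 :: t) ≠ [])]
    rw [cAdj_append (x2 :: t) b (by simp) hb]
    simp only [cAdj]
    ring

lemma cAdj_reverse : ∀ (l : List Int), cAdj l.reverse = cAdj l
  | [] => rfl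
  | [x] => rfl
  | x :: y :: t => by
    have hrev : (y :: t).reverse ≠ [] := by simp
    rw [List.reverse_cons, cAdj_append _ [x] hrev (by simp),
      List.getLast_reverse, cAdj_reverse (y :: t)]
    simp [cAdj, badB_comm]
    ring

-- the length of the breakpoint list is cAdj of the position list
lemma length_bpsAlt : ∀ (p : List Int), (bpsAlt p).length = cAdj p := by
  have key : ∀ (p : List Int),
      ((List.range (p.length - 1)).countP (fun k => badB (p.getD k 0) (p.getD (k + 1) 0))) = cAdj p := by
    intro p
    induction p with
    | nil => rfl
    | cons a t ih =>
      cases t with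
      | nil => rfl
      | cons b t' =>
        rw [show (a :: b :: t').length - 1 = t'.length + 1 from by simp,
          List.range_succ_eq_map, List.countP_cons, List.countP_map]
        simp only [Function.comp_def, Nat.succ_eq_add_one, List.getD_cons_succ,
          List.getD_cons_zero]
        rw [show (b :: t').length - 1 = t'.length from by simp] at ih
        simp only [List.getD_cons_succ] at ih
        rw [ih]
        simp only [cAdj]
        by_cases h : badB a b <;> simp [h, Nat.add_comm]
  intro p
  unfold bpsAlt
  rw [PySem.List.pyRange_one, List.filterMap_map]
  have hlen : (((p.length : Int) - 1 - 0).toNat) = p.length - 1 := by omega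
  have main : ∀ l : List Nat,
      (l.filterMap ((fun k => if (bget p k - bget p (k + 1)).natAbs ≠ 1 then some (k + 1) else none)
        ∘ fun k : Nat => (0 : Int) + ↑k)).length
      = l.countP (fun k => badB (p.getD k 0) (p.getD (k + 1) 0)) := by
    intro l
    induction l with
    | nil => rfl
    | cons x t ih =>
      have hx : bget p ((0:Int) + ↑x) = p.getD x 0 := by
        simp [bget, PySem.List.pyGetD_natCast]
      have hx1 : bget p ((0:Int) + ↑x + 1) = p.getD (x + 1) 0 := by
        have h : ((0:Int) + ↑x + 1) = ((x + 1 : Nat) : Int) := by push_cast; ring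
        rw [h, bget, PySem.List.pyGetD_natCast]
      rw [List.filterMap_cons, List.countP_cons]
      simp only [Function.comp_apply] at *
      rw [hx, hx1] at *
      by_cases h : (p.getD x 0 - p.getD (x + 1) 0).natAbs ≠ 1
      · simp only [if_pos h, List.length_cons, ih]
        have hb : badB (p.getD x 0) (p.getD (x + 1) 0) = true := by simpa [badB] using h
        simpa [List.getD_eq_getElem?_getD] using hb
      · simp only [if_neg h, ih]
        have hb : badB (p.getD x 0) (p.getD (x + 1) 0) = false := by simpa [badB] using h
        simpa [List.getD_eq_getElem?_getD] using hb
  rw [main, hlen, key p]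

-- heads and lasts of the three segments, as getD of the whole list
lemma cAdj_reversal (p : List Int) (i j : Nat) (h1 : 1 ≤ i) (hij : i < j) (hj : j < p.length)
    (hbi : badB (p.getD (i - 1) 0) (p.getD i 0) = true)
    (hbj : badB (p.getD (j - 1) 0) (p.getD j 0) = true) :
    (cAdj (p.take i ++ ((p.drop i).take (j - i)).reverse ++ p.drop j) : Int)
      = (cAdj p : Int) - 2
        + (if badB (p.getD (i - 1) 0) (p.getD (j - 1) 0) then 1 else 0)
        + (if badB (p.getD i 0) (p.getD j 0) then 1 else 0) := by
  set u := p.take i with hu_def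
  set v := (p.drop i).take (j - i) with hv_def
  set w := p.drop j with hw_def
  have hul : u.length = i := by simp [hu_def]; omega
  have hvl : v.length = j - i := by simp [hv_def]; omega
  have hwl : w.length = p.length - j := by simp [hw_def]
  have hu : u ≠ [] := by intro h; rw [h] at hul; simp at hul; omega
  have hv : v ≠ [] := by intro h; rw [h] at hvl; simp at hvl; omega
  have hw : w ≠ [] := by intro h; rw [h] at hwl; simp at hwl; omega
  have hvr : v.reverse ≠ [] := by simpa using hv
  have hvw : v ++ w = p.drop i := by
    rw [hv_def, hw_def, show p.drop j = (p.drop i).drop (j - i) from by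
      rw [List.drop_drop]; congr 1; omega]
    exact List.take_append_drop _ _
  have hp : p = u ++ (v ++ w) := by rw [hvw, hu_def, List.take_append_drop]
  -- heads and lasts
  have hup : ∀ (k : Nat) (h : k < u.length), u[k] = p.getD k 0 := by
    intro k h
    rw [List.getD_eq_getElem p 0 (by rw [hul] at h; omega)]
    exact List.getElem_take
  have hvp : ∀ (k : Nat) (h : k < v.length), v[k] = p.getD (i + k) 0 := by
    intro k h
    rw [List.getD_eq_getElem p 0 (by rw [hvl] at h; omega)]
    have h2 : k < (p.drop i).length := by simp; rw [hvl] at h; omega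
    calc v[k] = (p.drop i)[k]'h2 := List.getElem_take
      _ = p[i + k] := List.getElem_drop
  have hwp : ∀ (k : Nat) (h : k < w.length), w[k] = p.getD (j + k) 0 := by
    intro k h
    rw [List.getD_eq_getElem p 0 (by rw [hwl] at h; omega)]
    exact List.getElem_drop
  have hulast : u.getLast hu = p.getD (i - 1) 0 := by
    rw [List.getLast_eq_getElem, hup _ (by have := List.length_pos_iff.mpr hu; omega), hul]
  have hvhead : v.head hv = p.getD i 0 := by
    rw [List.head_eq_getElem, hvp _ (by have := List.length_pos_iff.mpr hv; omega)]
    congr 1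
  have hvlast : v.getLast hv = p.getD (j - 1) 0 := by
    rw [List.getLast_eq_getElem, hvp _ (by have := List.length_pos_iff.mpr hv; omega), hvl]
    congr 1
    omega
  have hwhead : w.head hw = p.getD j 0 := by
    rw [List.head_eq_getElem, hwp _ (by have := List.length_pos_iff.mpr hw; omega)]
    congr 1
  have hvwne : v ++ w ≠ [] := by simp [hv]
  have hrwne : v.reverse ++ w ≠ [] := by simp [hv]
  have hhead_vw : (v ++ w).head hvwne = v.head hv := List.head_append_of_ne_nil hv
  have hhead_rw : (v.reverse ++ w).head hrwne = v.reverse.head hvr := List.head_append_of_ne_nil hvr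
  -- decompose cAdj p
  have hsplit : cAdj p = cAdj u + (if badB (u.getLast hu) ((v ++ w).head hvwne) then 1 else 0)
      + (cAdj v + (if badB (v.getLast hv) (w.head hw) then 1 else 0) + cAdj w) := by
    conv_lhs => rw [hp]
    rw [cAdj_append u (v ++ w) hu hvwne, cAdj_append v w hv hw]
  have hsplit' : cAdj (u ++ v.reverse ++ w)
      = cAdj u + (if badB (u.getLast hu) ((v.reverse ++ w).head hrwne) then 1 else 0)
      + (cAdj v.reverse + (if badB (v.reverse.getLast hvr) (w.head hw) then 1 else 0) + cAdj w) := by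
    rw [List.append_assoc, cAdj_append u (v.reverse ++ w) hu hrwne,
      cAdj_append v.reverse w hvr hw]
  rw [hsplit']
  rw [hsplit]
  rw [hhead_vw, hhead_rw, List.head_reverse, List.getLast_reverse, cAdj_reverse,
    hulast, hvhead, hvlast, hwhead]
  rw [hbi, hbj]
  simp only [if_true]
  split_ifs <;> push_cast <;> omega

-- A's breakpoints ARE B's breakpoints of the fbIdx-position list
lemma fb_eq_bpsAlt (seq targ : List Int) :
    findBreakpointsL seq targ = bpsAlt (seq.map (fbIdx targ)) := by
  rw [← bpsAlt_eq seq targ]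
  congr 1
  exact List.map_congr_left (fun v _ => posTable_get targ v)

lemma length_fb (seq targ : List Int) :
    (findBreakpointsL seq targ).length = cAdj (seq.map (fbIdx targ)) := by
  rw [fb_eq_bpsAlt, length_bpsAlt]

-- what membership in the breakpoint list means
lemma mem_bpsAlt {p : List Int} {b : Int} (h : b ∈ bpsAlt p) :
    1 ≤ b ∧ b < p.length ∧ badB (p.getD (b - 1).toNat 0) (p.getD b.toNat 0) = true := by
  unfold bpsAlt at h
  obtain ⟨k, hk, hsome⟩ := List.mem_filterMap.mp h
  obtain ⟨hk0, hk1⟩ := PySem.List.mem_pyRange_one.mp hk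
  by_cases hc : (bget p k - bget p (k + 1)).natAbs ≠ 1
  · rw [if_pos hc] at hsome
    obtain rfl : k + 1 = b := Option.some_injective _ hsome
    refine ⟨by omega, by omega, ?_⟩
    have e1 : bget p k = p.getD (k + 1 - 1).toNat 0 := by
      rw [bget, PySem.List.pyGetD_eq_getElem _ _ hk0 (by omega),
        List.getD_eq_getElem p 0 (by omega)]
      congr 1
      omega
    have e2 : bget p (k + 1) = p.getD (k + 1).toNat 0 := by
      rw [bget, PySem.List.pyGetD_eq_getElem _ _ (by omega) (by omega),
        List.getD_eq_getElem p 0 (by omega)]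
    rw [e1, e2] at hc
    simpa [badB] using hc
  · rw [if_neg hc] at hsome
    exact absurd hsome (by simp)

-- breakpoint indices are strictly increasing
lemma bpsAlt_pairwise (p : List Int) : (bpsAlt p).Pairwise (· < ·) := by
  unfold bpsAlt
  rw [List.pairwise_filterMap]
  refine (PySem.List.pairwise_lt_pyRange_one 0 _).imp ?_
  intro a a' h b hb b' hb'
  have e : b = a + 1 := by
    by_cases hc : (bget p a - bget p (a + 1)).natAbs ≠ 1 <;> simp [hc] at hb <;> omega
  have e' : b' = a' + 1 := by
    by_cases hc : (bget p a' - bget p (a' + 1)).natAbs ≠ 1 <;> simp [hc] at hb' <;> omega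
  omega

-- positions commute with get_reverse
lemma map_getReverse (f : Int → Int) (seq : List Int) (bi bj : Int) (h0 : 0 ≤ bi) (h2 : 0 ≤ bj) :
    (getReverse seq bi bj).map f
      = (seq.map f).take bi.toNat ++ (((seq.map f).drop bi.toNat).take (bj.toNat - bi.toNat)).reverse
        ++ (seq.map f).drop bj.toNat := by
  unfold getReverse
  rw [PySem.List.slice_to seq h0, PySem.List.slice_toNat seq h0 h2, PySem.List.slice_from seq h2]
  simp [List.map_take, List.map_drop]

-- the O(1) rescoring formula: count of the reversal from the count of the parent
lemma rescore (seq targ : List Int) (bi bj : Int)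
    (hbi : bi ∈ bpsAlt (seq.map (fbIdx targ))) (hbj : bj ∈ bpsAlt (seq.map (fbIdx targ)))
    (hlt : bi < bj) :
    ((findBreakpointsL (getReverse seq bi bj) targ).length : Int)
      = ((bpsAlt (seq.map (fbIdx targ))).length : Int) - 2
        + (if (bget (seq.map (fbIdx targ)) (bi - 1) - bget (seq.map (fbIdx targ)) (bj - 1)).natAbs ≠ 1 then 1 else 0)
        + (if (bget (seq.map (fbIdx targ)) bi - bget (seq.map (fbIdx targ)) bj).natAbs ≠ 1 then 1 else 0) := by
  set p := seq.map (fbIdx targ) with hp_def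
  obtain ⟨hbi1, hbi2, hbi3⟩ := mem_bpsAlt hbi
  obtain ⟨hbj1, hbj2, hbj3⟩ := mem_bpsAlt hbj
  have hplen : p.length = seq.length := by simp [hp_def]
  rw [length_fb, map_getReverse (fbIdx targ) seq bi bj (by omega) (by omega), ← hp_def]
  rw [length_bpsAlt]
  have hij : bi.toNat < bj.toNat := by omega
  have formula := cAdj_reversal p bi.toNat bj.toNat (by omega) hij (by omega)
    (by rwa [show bi.toNat - 1 = (bi - 1).toNat from by omega]) 
    (by rwa [show bj.toNat - 1 = (bj - 1).toNat from by omega])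
  rw [formula]
  have g1 : bget p (bi - 1) = p.getD (bi.toNat - 1) 0 := by
    rw [bget, PySem.List.pyGetD_eq_getElem _ _ (by omega) (by omega),
      List.getD_eq_getElem p 0 (by omega)]
    congr 1
    omega
  have g2 : bget p (bj - 1) = p.getD (bj.toNat - 1) 0 := by
    rw [bget, PySem.List.pyGetD_eq_getElem _ _ (by omega) (by omega),
      List.getD_eq_getElem p 0 (by omega)]
    congr 1
    omega
  have g3 : bget p bi = p.getD bi.toNat 0 := by
    rw [bget, PySem.List.pyGetD_eq_getElem _ _ (by omega) (by omega),
      List.getD_eq_getElem p 0 (by omega)]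
  have g4 : bget p bj = p.getD bj.toNat 0 := by
    rw [bget, PySem.List.pyGetD_eq_getElem _ _ (by omega) (by omega),
      List.getD_eq_getElem p 0 (by omega)]
  rw [g1, g2, g3, g4]
  simp only [badB, decide_eq_true_eq]

-- canonical form of A's candidate generation for one sequence
def candA (targ : List Int) (sq : List Int × List (Int × Int)) : List (List Int × (List (Int × Int))) :=
  let bps := findBreakpointsL sq.1 targ
  (PySem.List.pyRange 0 ((bps.length : Int) - 1) 1).flatMap (fun i =>
    (PySem.List.pyRange (i + 1) (bps.length : Int) 1).map (fun j =>
      (getReverse sq.1 (bget bps i) (bget bps j), sq.2 ++ [(bget bps i - 1, bget bps j - 1)])))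

-- A's score of a candidate
def scoreA (targ : List Int) (r : List Int × (List (Int × Int))) : Int :=
  ((findBreakpointsL r.1 targ).length : Int)

-- A's append-accumulating double loop produces exactly candA for one sequence
lemma inner_gen (targ : List Int) (sq : List Int × List (Int × Int))
    (acc : List (List Int × (List (Int × Int)))) :
    (PySem.List.pyRange 0 (((findBreakpointsL sq.1 targ).length : Int) - 1) 1).foldl (fun a i =>
      (PySem.List.pyRange (i + 1) ((findBreakpointsL sq.1 targ).length : Int) 1).foldl (fun a2 j =>
        a2 ++ [(getReverse sq.1 (bget (findBreakpointsL sq.1 targ) i) (bget (findBreakpointsL sq.1 targ) j),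
                sq.2 ++ [(bget (findBreakpointsL sq.1 targ) i - 1, bget (findBreakpointsL sq.1 targ) j - 1)])]) a) acc
      = acc ++ candA targ sq := by
  simp only [PySem.List.foldl_append_singleton_eq_map, PySem.List.foldl_append_eq_flatMap, candA]

lemma gen_eq (targ : List Int) : ∀ (seqs : List (List Int × (List (Int × Int))))
    (acc : List (List Int × (List (Int × Int)))),
    seqs.foldl (fun revs sq =>
      (PySem.List.pyRange 0 (((findBreakpointsL sq.1 targ).length : Int) - 1) 1).foldl (fun a i =>
        (PySem.List.pyRange (i + 1) ((findBreakpointsL sq.1 targ).length : Int) 1).foldl (fun a2 j =>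
          a2 ++ [(getReverse sq.1 (bget (findBreakpointsL sq.1 targ) i) (bget (findBreakpointsL sq.1 targ) j),
                  sq.2 ++ [(bget (findBreakpointsL sq.1 targ) i - 1, bget (findBreakpointsL sq.1 targ) j - 1)])]) a) revs) acc
      = acc ++ seqs.flatMap (candA targ)
  | [], acc => by simp
  | sq :: rest, acc => by
    rw [List.foldl_cons]
    show rest.foldl _ ((PySem.List.pyRange 0 (((findBreakpointsL sq.1 targ).length : Int) - 1) 1).foldl _ acc) = _
    rw [gen_eq targ rest _, inner_gen targ sq acc]
    simp

-- B's scored-candidate generation for one sequence, canonical form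
def candB (targ : List Int) (sq : List Int × List (Int × Int)) : List ((List Int × (List (Int × Int))) × Int) :=
  if sq.1.length < 2 then [] else
  (PySem.List.pyRange 0 (((bpsAlt (sq.1.map (fun v => (PySem.Dict.get? (posTable targ) v).getD 0))).length : Int) - 1) 1).flatMap (fun x =>
    (PySem.List.pyRange (x + 1) ((bpsAlt (sq.1.map (fun v => (PySem.Dict.get? (posTable targ) v).getD 0))).length : Int) 1).map (fun y =>
      ((getReverse sq.1 (bget (bpsAlt (sq.1.map (fun v => (PySem.Dict.get? (posTable targ) v).getD 0))) x) (bget (bpsAlt (sq.1.map (fun v => (PySem.Dict.get? (posTable targ) v).getD 0))) y),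
        sq.2 ++ [(bget (bpsAlt (sq.1.map (fun v => (PySem.Dict.get? (posTable targ) v).getD 0))) x - 1, bget (bpsAlt (sq.1.map (fun v => (PySem.Dict.get? (posTable targ) v).getD 0))) y - 1)]),
        (((bpsAlt (sq.1.map (fun v => (PySem.Dict.get? (posTable targ) v).getD 0))).length : Int) - 2
          + (if (bget (sq.1.map (fun v => (PySem.Dict.get? (posTable targ) v).getD 0)) (bget (bpsAlt (sq.1.map (fun v => (PySem.Dict.get? (posTable targ) v).getD 0))) x - 1) - bget (sq.1.map (fun v => (PySem.Dict.get? (posTable targ) v).getD 0)) (bget (bpsAlt (sq.1.map (fun v => (PySem.Dict.get? (posTable targ) v).getD 0))) y - 1)).natAbs ≠ 1 then 1 else 0)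
          + (if (bget (sq.1.map (fun v => (PySem.Dict.get? (posTable targ) v).getD 0)) (bget (bpsAlt (sq.1.map (fun v => (PySem.Dict.get? (posTable targ) v).getD 0))) x) - bget (sq.1.map (fun v => (PySem.Dict.get? (posTable targ) v).getD 0)) (bget (bpsAlt (sq.1.map (fun v => (PySem.Dict.get? (posTable targ) v).getD 0))) y)).natAbs ≠ 1 then 1 else 0)))))

lemma genB_eq (targ : List Int) : ∀ (seqs : List (List Int × (List (Int × Int))))
    (acc : List ((List Int × (List (Int × Int))) × Int)),
    seqs.foldl (fun acc sq =>
      if sq.1.length < 2 then acc else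
      (PySem.List.pyRange 0 (((bpsAlt (sq.1.map (fun v => (PySem.Dict.get? (posTable targ) v).getD 0))).length : Int) - 1) 1).foldl (fun a x =>
        (PySem.List.pyRange (x + 1) ((bpsAlt (sq.1.map (fun v => (PySem.Dict.get? (posTable targ) v).getD 0))).length : Int) 1).foldl (fun a2 y =>
          a2 ++ [((getReverse sq.1 (bget (bpsAlt (sq.1.map (fun v => (PySem.Dict.get? (posTable targ) v).getD 0))) x) (bget (bpsAlt (sq.1.map (fun v => (PySem.Dict.get? (posTable targ) v).getD 0))) y), sq.2 ++ [(bget (bpsAlt (sq.1.map (fun v => (PySem.Dict.get? (posTable targ) v).getD 0))) x - 1, bget (bpsAlt (sq.1.map (fun v => (PySem.Dict.get? (posTable targ) v).getD 0))) y - 1)]),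
            (((bpsAlt (sq.1.map (fun v => (PySem.Dict.get? (posTable targ) v).getD 0))).length : Int) - 2
              + (if (bget (sq.1.map (fun v => (PySem.Dict.get? (posTable targ) v).getD 0)) (bget (bpsAlt (sq.1.map (fun v => (PySem.Dict.get? (posTable targ) v).getD 0))) x - 1) - bget (sq.1.map (fun v => (PySem.Dict.get? (posTable targ) v).getD 0)) (bget (bpsAlt (sq.1.map (fun v => (PySem.Dict.get? (posTable targ) v).getD 0))) y - 1)).natAbs ≠ 1 then 1 else 0)
              + (if (bget (sq.1.map (fun v => (PySem.Dict.get? (posTable targ) v).getD 0)) (bget (bpsAlt (sq.1.map (fun v => (PySem.Dict.get? (posTable targ) v).getD 0))) x) - bget (sq.1.map (fun v => (PySem.Dict.get? (posTable targ) v).getD 0)) (bget (bpsAlt (sq.1.map (fun v => (PySem.Dict.get? (posTable targ) v).getD 0))) y)).natAbs ≠ 1 then 1 else 0)))]) a) acc) acc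
      = acc ++ seqs.flatMap (candB targ)
  | [], acc => by simp
  | sq :: rest, acc => by
    rw [List.foldl_cons]
    by_cases hlen : sq.1.length < 2
    · rw [if_pos hlen]
      rw [genB_eq targ rest acc]
      have : candB targ sq = [] := by rw [candB, if_pos hlen]
      simp [this]
    · rw [if_neg hlen]
      show rest.foldl _ ((PySem.List.pyRange 0 (((bpsAlt (sq.1.map (fun v => (PySem.Dict.get? (posTable targ) v).getD 0))).length : Int) - 1) 1).foldl _ acc) = _
      rw [genB_eq targ rest _]
      have : (PySem.List.pyRange 0 (((bpsAlt (sq.1.map (fun v => (PySem.Dict.get? (posTable targ) v).getD 0))).length : Int) - 1) 1).foldl (fun a x =>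
          (PySem.List.pyRange (x + 1) ((bpsAlt (sq.1.map (fun v => (PySem.Dict.get? (posTable targ) v).getD 0))).length : Int) 1).foldl (fun a2 y =>
            a2 ++ [((getReverse sq.1 (bget (bpsAlt (sq.1.map (fun v => (PySem.Dict.get? (posTable targ) v).getD 0))) x) (bget (bpsAlt (sq.1.map (fun v => (PySem.Dict.get? (posTable targ) v).getD 0))) y),
                     sq.2 ++ [(bget (bpsAlt (sq.1.map (fun v => (PySem.Dict.get? (posTable targ) v).getD 0))) x - 1, bget (bpsAlt (sq.1.map (fun v => (PySem.Dict.get? (posTable targ) v).getD 0))) y - 1)]),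
                    (((bpsAlt (sq.1.map (fun v => (PySem.Dict.get? (posTable targ) v).getD 0))).length : Int) - 2
                      + (if (bget (sq.1.map (fun v => (PySem.Dict.get? (posTable targ) v).getD 0)) (bget (bpsAlt (sq.1.map (fun v => (PySem.Dict.get? (posTable targ) v).getD 0))) x - 1) - bget (sq.1.map (fun v => (PySem.Dict.get? (posTable targ) v).getD 0)) (bget (bpsAlt (sq.1.map (fun v => (PySem.Dict.get? (posTable targ) v).getD 0))) y - 1)).natAbs ≠ 1 then 1 else 0)
                      + (if (bget (sq.1.map (fun v => (PySem.Dict.get? (posTable targ) v).getD 0)) (bget (bpsAlt (sq.1.map (fun v => (PySem.Dict.get? (posTable targ) v).getD 0))) x) - bget (sq.1.map (fun v => (PySem.Dict.get? (posTable targ) v).getD 0)) (bget (bpsAlt (sq.1.map (fun v => (PySem.Dict.get? (posTable targ) v).getD 0))) y)).natAbs ≠ 1 then 1 else 0)))]) a) acc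
          = acc ++ candB targ sq := by
        simp only [PySem.List.foldl_append_singleton_eq_map, PySem.List.foldl_append_eq_flatMap]
        rw [candB, if_neg hlen]
      rw [this]
      simp

-- every scored candidate of B is an A candidate paired with A's recount
lemma candB_eq (targ : List Int) (sq : List Int × List (Int × Int)) :
    candB targ sq = (candA targ sq).map (fun r => (r, scoreA targ r)) := by
  by_cases hlen : sq.1.length < 2
  · rw [candB, if_pos hlen]
    have hfb : findBreakpointsL sq.1 targ = [] := by
      unfold findBreakpointsL
      rw [PySem.List.pyRange_one_eq_nil (by omega : ((sq.1.length : Int) - 1) ≤ 0)]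
      rfl
    rw [candA, hfb]
    simp [PySem.List.pyRange_one_eq_nil]
  · rw [candB, if_neg hlen, candA]
    have hmap : sq.1.map (fun v => (PySem.Dict.get? (posTable targ) v).getD 0)
        = sq.1.map (fbIdx targ) := List.map_congr_left (fun v _ => posTable_get targ v)
    rw [hmap, ← fb_eq_bpsAlt]
    rw [List.map_flatMap]
    refine List.flatMap_congr (fun x hx => ?_)
    obtain ⟨hx0, hx1⟩ := PySem.List.mem_pyRange_one.mp hx
    rw [List.map_map]
    refine List.map_congr_left (fun y hy => ?_)
    obtain ⟨hy0, hy1⟩ := PySem.List.mem_pyRange_one.mp hy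
    simp only [Function.comp_apply, Prod.mk.injEq]
    refine ⟨trivial, ?_⟩
    have hx2 : x.toNat < (findBreakpointsL sq.1 targ).length := by omega
    have hy2 : y.toNat < (findBreakpointsL sq.1 targ).length := by omega
    have hbx : bget (findBreakpointsL sq.1 targ) x = (findBreakpointsL sq.1 targ)[x.toNat] := by
      rw [bget, PySem.List.pyGetD_eq_getElem _ _ (by omega) (by omega)]
    have hby : bget (findBreakpointsL sq.1 targ) y = (findBreakpointsL sq.1 targ)[y.toNat] := by
      rw [bget, PySem.List.pyGetD_eq_getElem _ _ (by omega) (by omega)]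
    have hmemx : bget (findBreakpointsL sq.1 targ) x ∈ bpsAlt (sq.1.map (fbIdx targ)) := by
      rw [← fb_eq_bpsAlt, hbx]
      exact List.getElem_mem hx2
    have hmemy : bget (findBreakpointsL sq.1 targ) y ∈ bpsAlt (sq.1.map (fbIdx targ)) := by
      rw [← fb_eq_bpsAlt, hby]
      exact List.getElem_mem hy2
    have hpw : (findBreakpointsL sq.1 targ).Pairwise (· < ·) := by
      rw [fb_eq_bpsAlt]
      exact bpsAlt_pairwise _
    have hlt : bget (findBreakpointsL sq.1 targ) x < bget (findBreakpointsL sq.1 targ) y := by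
      rw [hbx, hby]
      exact List.pairwise_iff_getElem.mp hpw x.toNat y.toNat hx2 hy2 (by omega)
    rw [scoreA, rescore sq.1 targ _ _ hmemx hmemy hlt, ← fb_eq_bpsAlt]

-- the running-min tracking loop is min-then-filter
lemma foldl_min_le_init (a : Int) : ∀ l : List Int, l.foldl min a ≤ a
  | [] => le_refl a
  | x :: t => le_trans (foldl_min_le_init (min a x) t) (min_le_left a x)

lemma track {α : Type} (c : α → Int) : ∀ (rs : List α) (m0 : Int) (acc : List α),
    (rs.foldl (fun st r =>
      if c r < st.1 then (c r, [r])
      else if c r = st.1 then (st.1, st.2 ++ [r])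
      else st) (m0, acc)).2
    = (if (rs.map c).foldl min m0 < m0 then [] else acc)
      ++ rs.filter (fun r => c r = (rs.map c).foldl min m0)
  | [], m0, acc => by simp
  | r :: rs, m0, acc => by
    have hfold : ((r :: rs).map c).foldl min m0 = (rs.map c).foldl min (min m0 (c r)) := by
      simp [List.foldl_cons]
    rcases lt_trichotomy (c r) m0 with h | h | h
    · have hm : min m0 (c r) = c r := by omega
      rw [List.foldl_cons]
      simp only [if_pos h]
      rw [track c rs (c r) [r], hfold, hm]
      have hle := foldl_min_le_init (c r) (rs.map c)
      have hlt : (rs.map c).foldl min (c r) < m0 := by omega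
      rw [if_pos hlt, List.filter_cons]
      by_cases h2 : (rs.map c).foldl min (c r) < c r
      · rw [if_pos h2]
        have hne : ¬ (c r = (rs.map c).foldl min (c r)) := by omega
        simp [hne]
      · have he : (rs.map c).foldl min (c r) = c r := by omega
        rw [if_neg h2]
        simp [he]
    · have hm : min m0 (c r) = m0 := by omega
      rw [List.foldl_cons]
      simp only [if_neg (by omega : ¬ c r < m0), if_pos h]
      rw [track c rs m0 (acc ++ [r]), hfold, hm, List.filter_cons]
      have hle := foldl_min_le_init m0 (rs.map c)
      by_cases h2 : (rs.map c).foldl min m0 < m0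
      · rw [if_pos h2, if_pos h2]
        have hne : ¬ (c r = (rs.map c).foldl min m0) := by omega
        simp [hne]
      · rw [if_neg h2, if_neg h2]
        have hcr : c r = (rs.map c).foldl min m0 := by omega
        simp [hcr, List.append_assoc]
    · have hm : min m0 (c r) = m0 := by omega
      rw [List.foldl_cons]
      simp only [if_neg (by omega : ¬ c r < m0), if_neg (by omega : ¬ c r = m0)]
      rw [track c rs m0 acc, hfold, hm, List.filter_cons]
      have hle := foldl_min_le_init m0 (rs.map c)
      have hne : ¬ (c r = (rs.map c).foldl min m0) := by omega
      simp [hne]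

-- B's filter over (candidate, count) pairs is a plain filter on the candidates
lemma pair_filter {α : Type} (c : α → Int) (m : Int) : ∀ l : List α,
    ((l.map (fun r => (r, c r))).filterMap fun rc => if rc.2 = m then some rc.1 else none)
      = l.filter (fun r => c r = m)
  | [] => rfl
  | x :: t => by
    simp only [List.map_cons, List.filterMap_cons, List.filter_cons]
    by_cases h : c x = m <;> simp [h, pair_filter c m t]

-- ===== VERDICT (by name: the statement is the Claim_ definition above) =====
theorem findMinimumBreakpointReversals_spec : Claim_equal_findMinimumBreakpointReversals := by
  intro seqs targ _ _
  unfold Spec_findMinimumBreakpointReversals findMinimumBreakpointReversals findMinimumBreakpointReversals_alt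
  dsimp only []
  rw [gen_eq targ seqs [], genB_eq targ seqs [], List.nil_append, List.nil_append]
  have hscored : seqs.flatMap (candB targ)
      = (seqs.flatMap (candA targ)).map (fun r => (r, scoreA targ r)) := by
    rw [List.map_flatMap]
    exact List.flatMap_congr (fun sq _ => candB_eq targ sq)
  rw [hscored]
  show (List.foldl (fun st r =>
      if scoreA targ r < st.1 then (scoreA targ r, [r])
      else if scoreA targ r = st.1 then (st.1, st.2 ++ [r])
      else st)
      (((targ.length : Int)), ([] : List (List Int × (List (Int × Int)))))
      (seqs.flatMap (candA targ))).2
    = ((seqs.flatMap (candA targ)).map (fun r => (r, scoreA targ r))).filterMap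
        (fun rc => if rc.2 = ((PySem.List.min? (((targ.length : Int)) ::
            ((seqs.flatMap (candA targ)).map (fun r => (r, scoreA targ r))).map (fun rc => rc.2)) (fun y => y)).getD 0)
          then some rc.1 else none)
  rw [List.map_map]
  rw [show ((fun rc : (List Int × (List (Int × Int))) × Int => rc.2) ∘ (fun r => (r, scoreA targ r))) = scoreA targ from rfl]
  rw [track (scoreA targ) (seqs.flatMap (candA targ)) ((targ.length : Int)) [],
    pair_filter (scoreA targ) _ (seqs.flatMap (candA targ))]
  simp only [PySem.List.min?_id_cons, Option.getD_some, ite_self, List.nil_append]
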